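-- pv_equiv track=rewrite | github.com/daswer123/silero-tts-enhanced | silero_tts/silero_tts.py | find_max_char_position
-- ===== SOURCE A (Python) =====
-- def find_max_char_position(positions: list, limit: int) -> int:
--     max_position = 0
--     for pos in positions:
--         if pos < limit:
--             max_position = pos
--         else:
--             break
--     return max_position
-- ===== SOURCE B (Python) =====
-- def find_max_char_position(positions: list, limit: int) -> int:
--     # Binary search for the first index whose value is >= limit (positions sorted
--     # ascending); the answer is the element just before it, or 0 if there is none.
--     lo, hi = 0, len(positions)
--     while lo < hi:
--         mid = (lo + hi) // 2
--         if positions[mid] < limit: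
--             lo = mid + 1
--         else:
--             hi = mid
--     return positions[lo - 1] if lo > 0 else 0
-- ===== Notes on version B (the rewrite author's own statement) =====
-- stated objective: alternative
-- what changed: Replaces A's left-to-right scan-with-break by a binary search for the first element >= limit, returning its predecessor (or 0); requires the list to be sorted ascending, which Pre_ states (O(log n) probes vs A's O(n) scan on sorted input, though a timing run draws unsorted inputs so no speed is claimed).
-- outside the precondition, e.g. on find_max_char_position([10, 2], 5): A returns 0, B returns 2
import Mathlib
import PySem

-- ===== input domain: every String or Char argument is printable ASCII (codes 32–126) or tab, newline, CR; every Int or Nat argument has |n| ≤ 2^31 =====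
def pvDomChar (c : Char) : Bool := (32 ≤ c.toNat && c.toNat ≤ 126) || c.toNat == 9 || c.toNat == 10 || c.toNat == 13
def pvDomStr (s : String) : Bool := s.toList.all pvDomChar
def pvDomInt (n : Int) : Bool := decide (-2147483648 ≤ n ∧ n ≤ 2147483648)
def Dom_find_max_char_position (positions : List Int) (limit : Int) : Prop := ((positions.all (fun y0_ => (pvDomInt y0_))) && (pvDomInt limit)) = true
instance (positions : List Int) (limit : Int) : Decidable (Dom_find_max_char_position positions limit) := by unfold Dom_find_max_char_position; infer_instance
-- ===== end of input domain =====

-- B replaces A's linear scan-with-break by a binary search on the (sorted, per Pre_) list: a different algorithm.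

-- ===== PORT A =====
-- A's loop: carry max_position; update while pos < limit, stop at the first pos ≥ limit.
def findMaxGo (limit : Int) : List Int → Int → Int
  | [], m => m
  | p :: t, m => if p < limit then findMaxGo limit t p else m

def find_max_char_position (positions : List Int) (limit : Int) : Int :=
  findMaxGo limit positions 0

-- ===== PORT B =====
-- B's while-loop: binary search for the first index with positions[mid] ≥ limit.
-- fuel = hi - lo bounds the iteration count (the interval shrinks by ≥ 1 each step),
-- so the loop is structural recursion on the fuel; it changes nothing else.
def bsGoF (positions : List Int) (limit : Int) : Nat → Nat → Nat → Nat
  | 0, lo, _ => lo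
  | fuel + 1, lo, hi =>
    if lo < hi then
      let mid := (lo + hi) / 2
      if positions.getD mid 0 < limit then bsGoF positions limit fuel (mid + 1) hi
      else bsGoF positions limit fuel lo mid
    else lo

def bsGo (positions : List Int) (limit : Int) (lo hi : Nat) : Nat :=
  bsGoF positions limit (hi - lo) lo hi

def find_max_char_position_alt (positions : List Int) (limit : Int) : Int :=
  let i := bsGo positions limit 0 positions.length
  if 0 < i then positions.getD (i - 1) 0 else 0

-- ===== PRECONDITION & SPEC =====
-- Pre_ excludes unsorted lists (on which A still returns): A's last-before-first-break value on an
-- unsorted list is an artefact of scan order with no meaning for "max position below limit"; B's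
-- binary search assumes the ascending order the caller (accumulated split positions) guarantees.
def sortedAdj : List Int → Bool
  | [] => true
  | [_] => true
  | a :: b :: t => a ≤ b && sortedAdj (b :: t)

def Pre_find_max_char_position (positions : List Int) (limit : Int) : Prop :=
  sortedAdj positions = true
instance (positions : List Int) (limit : Int) : Decidable (Pre_find_max_char_position positions limit) := by unfold Pre_find_max_char_position; infer_instance

def pvWitness_find_max_char_position : List Int × Int := ([1, 3, 5], 4)

def Spec_find_max_char_position (positions : List Int) (limit : Int) (out : Int) : Prop := out = find_max_char_position_alt positions limit
instance (positions : List Int) (limit : Int) (out : Int) : Decidable (Spec_find_max_char_position positions limit out) := by unfold Spec_find_max_char_position; infer_instance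

-- ===== CLAIM (what is proved, stated in full; the proofs are below) =====
def Claim_equal_find_max_char_position : Prop := ∀ (positions : List Int) (limit : Int), Dom_find_max_char_position positions limit → Pre_find_max_char_position positions limit → Spec_find_max_char_position positions limit (find_max_char_position positions limit)

-- ===== LEMMAS AND PROOFS =====

-- A's scan equals the "first index k with positions[k] ≥ limit" characterisation.
theorem findMaxGo_eq (limit : Int) (l : List Int) (k : Nat) (m : Int)
    (hk : k ≤ l.length)
    (h1 : ∀ j (hj : j < l.length), j < k → l[j] < limit)
    (h2 : ∀ j (hj : j < l.length), k ≤ j → limit ≤ l[j]) :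
    findMaxGo limit l m = if 0 < k then l.getD (k - 1) 0 else m := by
  induction l generalizing k m with
  | nil =>
    have : k = 0 := by simpa using hk
    simp [findMaxGo, this]
  | cons p t ih =>
    by_cases hp : p < limit
    · have hk0 : 0 < k := by
        by_contra h
        have := h2 0 (by simp) (by omega)
        simp at this; omega
      obtain ⟨k', rfl⟩ : ∃ k', k = k' + 1 := ⟨k - 1, by omega⟩
      have step : findMaxGo limit (p :: t) m = findMaxGo limit t p := by
        simp [findMaxGo, hp]
      rw [step, ih k' p (by simpa using hk)
        (fun j hj hjk => by
          have := h1 (j + 1) (by simpa using Nat.succ_lt_succ hj) (by omega)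
          simpa using this)
        (fun j hj hjk => by
          have := h2 (j + 1) (by simpa using Nat.succ_lt_succ hj) (by omega)
          simpa using this)]
      cases k' with
      | zero => simp
      | succ k'' => simp
    · have hk0 : k = 0 := by
        by_contra h
        have := h1 0 (by simp) (by omega)
        simp at this; omega
      simp [findMaxGo, hp, hk0]

-- sorted access monotonicity
theorem sorted_getElem_le {l : List Int} (hs : List.Pairwise (· ≤ ·) l)
    {i j : Nat} (hij : i ≤ j) (hj : j < l.length) : l[i]'(by omega) ≤ l[j] := by
  rcases Nat.lt_or_ge i j with h | h
  · exact (List.pairwise_iff_getElem.mp hs) i j (by omega) hj h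
  · have : i = j := by omega
    subst this; exact le_refl _

-- Pre_'s adjacent-pairs check implies global sortedness
theorem pairwise_of_sortedAdj : ∀ (l : List Int), sortedAdj l = true → List.Pairwise (· ≤ ·) l
  | [], _ => List.Pairwise.nil
  | [_], _ => by simp
  | a :: b :: t, h => by
    rw [sortedAdj, Bool.and_eq_true, decide_eq_true_eq] at h
    have ht := pairwise_of_sortedAdj (b :: t) h.2
    refine List.pairwise_cons.mpr ⟨?_, ht⟩
    intro x hx
    rcases List.mem_cons.mp hx with rfl | hx
    · exact h.1
    · exact le_trans h.1 ((List.pairwise_cons.mp ht).1 x hx)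

-- binary-search invariant: the loop returns the first index with value ≥ limit
theorem bsGoF_spec (l : List Int) (x : Int) (hs : List.Pairwise (· ≤ ·) l) :
    ∀ (fuel lo hi : Nat), hi - lo ≤ fuel → lo ≤ hi → hi ≤ l.length →
      (∀ j (hj : j < l.length), j < lo → l[j] < x) →
      (∀ j (hj : j < l.length), hi ≤ j → x ≤ l[j]) →
      bsGoF l x fuel lo hi ≤ l.length ∧
      (∀ j (hj : j < l.length), j < bsGoF l x fuel lo hi → l[j] < x) ∧
      (∀ j (hj : j < l.length), bsGoF l x fuel lo hi ≤ j → x ≤ l[j]) := by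
  intro fuel
  induction fuel with
  | zero =>
    intro lo hi hf hlohi hhil h1 h2
    have heq : lo = hi := by omega
    subst heq
    exact ⟨by simpa [bsGoF] using hhil, by simpa [bsGoF] using h1, by simpa [bsGoF] using h2⟩
  | succ fuel ih =>
    intro lo hi hf hlohi hhil h1 h2
    by_cases hlt : lo < hi
    · have hmidhi : (lo + hi) / 2 < hi := by omega
      have hmidlo : lo ≤ (lo + hi) / 2 := by omega
      have hmidlt : (lo + hi) / 2 < l.length := by omega
      have hget : l.getD ((lo + hi) / 2) 0 = l[(lo + hi) / 2] := List.getD_eq_getElem l 0 hmidlt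
      by_cases hm : l.getD ((lo + hi) / 2) 0 < x
      · rw [show bsGoF l x (fuel + 1) lo hi = bsGoF l x fuel ((lo + hi) / 2 + 1) hi by
          rw [bsGoF, if_pos hlt, if_pos hm]]
        refine ih ((lo + hi) / 2 + 1) hi (by omega) (by omega) hhil ?_ h2
        intro j hj hjlt
        have hle : l[j] ≤ l[(lo + hi) / 2] := sorted_getElem_le hs (by omega) hmidlt
        rw [hget] at hm
        omega
      · rw [show bsGoF l x (fuel + 1) lo hi = bsGoF l x fuel lo ((lo + hi) / 2) by
          rw [bsGoF, if_pos hlt, if_neg hm]]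
        refine ih lo ((lo + hi) / 2) (by omega) (by omega) (by omega) h1 ?_
        intro j hj hjge
        have hle : l[(lo + hi) / 2] ≤ l[j] := sorted_getElem_le hs hjge hj
        rw [hget] at hm
        omega
    · have heq : lo = hi := by omega
      subst heq
      exact ⟨by simpa [bsGoF] using hhil, by simpa [bsGoF] using h1, by simpa [bsGoF] using h2⟩

-- ===== VERDICT (by name: the statement is the Claim_ definition above) =====
theorem find_max_char_position_spec : Claim_equal_find_max_char_position := by
  intro positions limit _hdom hpre
  have hpair : List.Pairwise (· ≤ ·) positions := pairwise_of_sortedAdj positions hpre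
  unfold Spec_find_max_char_position
  obtain ⟨hle, h1, h2⟩ := bsGoF_spec positions limit hpair (positions.length - 0) 0
    positions.length (le_refl _) (by omega) (le_refl _) (by omega) (by omega)
  unfold find_max_char_position find_max_char_position_alt bsGo
  exact findMaxGo_eq limit positions (bsGoF positions limit (positions.length - 0) 0 positions.length) 0 hle h1 h2
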